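-- pv_equiv track=rewrite | github.com/VilmerD/AOC25 | src/day4/main.py | computeNbrs
-- ===== SOURCE A (Python) =====
-- def computeNbrs(X):
--     M = len(X)
--     N = len(X[0])
--
--     Y = []
--     for r in range(1, M-1):
--         y = []
--         for c in range(1, N-1):
--             nbrs = 0
--             for rr in range(-1, 2):
--                 for cc in range(-1, 2):
--                     nbrs += X[r+rr][c+cc]
--             nbrs = nbrs - X[r][c]
--             y.append(nbrs)
--         Y.append(y)
--     return Y
-- ===== SOURCE B (Python) =====
-- def computeNbrs(X):
--     M = len(X)
--     N = len(X[0])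
--     Y = []
--     for r in range(1, M - 1):
--         # column-triple sums of the three-row band r-1..r+1
--         S = [a + b + c for a, b, c in zip(X[r - 1], X[r], X[r + 1])]
--         Y.append([S[c - 1] + S[c] + S[c + 1] - X[r][c] for c in range(1, N - 1)])
--     return Y
-- ===== Notes on version B (the rewrite author's own statement) =====
-- stated objective: faster
-- what changed: Replaces the 9-cell rescan per interior cell by a per-row-band list of column triple sums (zip of three rows) plus a 3-wide horizontal window, removing the innermost double loop.
import Mathlib
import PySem

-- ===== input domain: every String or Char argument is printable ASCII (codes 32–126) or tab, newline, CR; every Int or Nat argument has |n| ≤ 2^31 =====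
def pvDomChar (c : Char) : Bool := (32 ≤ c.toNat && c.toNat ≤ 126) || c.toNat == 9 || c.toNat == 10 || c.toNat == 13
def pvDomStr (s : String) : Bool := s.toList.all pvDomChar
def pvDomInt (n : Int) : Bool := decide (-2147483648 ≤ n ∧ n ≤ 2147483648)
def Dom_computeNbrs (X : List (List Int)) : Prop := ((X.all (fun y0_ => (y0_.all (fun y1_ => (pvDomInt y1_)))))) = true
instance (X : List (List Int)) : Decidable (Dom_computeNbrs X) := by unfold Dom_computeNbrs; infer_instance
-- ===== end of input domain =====

-- B replaces A's 9-cell rescan per interior cell by per-row-band column triple sums (zip of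
-- the three rows) plus a 3-wide horizontal window: fewer reads per cell (objective: faster,
-- constant factor).

-- ===== PORT A =====
-- X[i][j] reads are ported with pyGetD (total form); Pre_computeNbrs below excludes exactly
-- the inputs where Python's indexing would raise.
def computeNbrs (X : List (List Int)) : List (List Int) :=
  let M : Int := X.length
  let N : Int := (PySem.List.pyGetD X 0 []).length
  (PySem.List.pyRange 1 (M - 1) 1).map (fun r =>
    (PySem.List.pyRange 1 (N - 1) 1).map (fun c =>
      ((PySem.List.pyRange (-1) 2 1).foldl (fun acc rr =>
        (PySem.List.pyRange (-1) 2 1).foldl (fun acc cc =>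
          acc + PySem.List.pyGetD (PySem.List.pyGetD X (r + rr) []) (c + cc) 0) acc) 0)
      - PySem.List.pyGetD (PySem.List.pyGetD X r []) c 0))

-- ===== PORT B =====
-- transliterates Source B's "[a+b+c for a,b,c in zip(row0,row1,row2)]" (zip truncates at the
-- shortest row, as this recursion does)
def tripleSum : List Int → List Int → List Int → List Int
  | a :: as, b :: bs, c :: cs => (a + b + c) :: tripleSum as bs cs
  | _, _, _ => []

def computeNbrs_alt (X : List (List Int)) : List (List Int) :=
  let M : Int := X.length
  let N : Int := (PySem.List.pyGetD X 0 []).length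
  (PySem.List.pyRange 1 (M - 1) 1).map (fun r =>
    let S := tripleSum (PySem.List.pyGetD X (r - 1) []) (PySem.List.pyGetD X r [])
               (PySem.List.pyGetD X (r + 1) [])
    (PySem.List.pyRange 1 (N - 1) 1).map (fun c =>
      PySem.List.pyGetD S (c - 1) 0 + PySem.List.pyGetD S c 0 + PySem.List.pyGetD S (c + 1) 0
        - PySem.List.pyGetD (PySem.List.pyGetD X r []) c 0))

-- ===== PRECONDITION & SPEC =====
-- Pre_ is exactly where Python A returns: X nonempty (otherwise len(X[0]) raises IndexError), and when there
-- are interior cells (M ≥ 3 and N ≥ 3) every row must reach column N-1, i.e. have length ≥ N.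
def Pre_computeNbrs (X : List (List Int)) : Prop :=
  X ≠ [] ∧ (3 ≤ X.length → 3 ≤ (X.headD []).length →
    ∀ row ∈ X, (X.headD []).length ≤ row.length)
instance (X : List (List Int)) : Decidable (Pre_computeNbrs X) := by
  unfold Pre_computeNbrs; infer_instance
def pvWitness_computeNbrs : List (List Int) := [[1, 2, 3], [4, 5, 6], [7, 8, 9]]
def Spec_computeNbrs (X : List (List Int)) (out : List (List Int)) : Prop := out = computeNbrs_alt X
instance (X : List (List Int)) (out : List (List Int)) : Decidable (Spec_computeNbrs X out) := by unfold Spec_computeNbrs; infer_instance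

-- ===== CLAIM (what is proved, stated in full; the proofs are below) =====
def Claim_equal_computeNbrs : Prop := ∀ (X : List (List Int)), Dom_computeNbrs X → Pre_computeNbrs X → Spec_computeNbrs X (computeNbrs X)

-- ===== LEMMAS AND PROOFS =====

theorem tripleSum_getD (as bs cs : List Int) (j : Nat)
    (ha : j < as.length) (hb : j < bs.length) (hc : j < cs.length) :
    (tripleSum as bs cs).getD j 0 = as.getD j 0 + bs.getD j 0 + cs.getD j 0 := by
  induction as generalizing bs cs j with
  | nil => simp at ha
  | cons a as ih =>
    cases bs with
    | nil => simp at hb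
    | cons b bs =>
      cases cs with
      | nil => simp at hc
      | cons c cs =>
        cases j with
        | zero => simp [tripleSum]
        | succ j => simpa [tripleSum] using ih bs cs j (by simpa using ha) (by simpa using hb) (by simpa using hc)

-- per-cell equality on interior cells, under the row-length bound
theorem cell_eq (X : List (List Int)) (N : Nat)
    (hlen : ∀ row ∈ X, N ≤ row.length)
    (r c : Int) (hr1 : 1 ≤ r) (hr2 : r < (X.length : Int) - 1)
    (hc1 : 1 ≤ c) (hc2 : c < (N : Int) - 1) :
    ((PySem.List.pyRange (-1) 2 1).foldl (fun acc rr =>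
        (PySem.List.pyRange (-1) 2 1).foldl (fun acc cc =>
          acc + PySem.List.pyGetD (PySem.List.pyGetD X (r + rr) []) (c + cc) 0) acc) 0)
      = (let S := tripleSum (PySem.List.pyGetD X (r - 1) []) (PySem.List.pyGetD X r [])
                    (PySem.List.pyGetD X (r + 1) [])
         PySem.List.pyGetD S (c - 1) 0 + PySem.List.pyGetD S c 0 + PySem.List.pyGetD S (c + 1) 0) := by
  have hrange : PySem.List.pyRange (-1) 2 1 = [-1, 0, 1] := by decide
  set R0 := X.getD (r - 1).toNat [] with hR0
  set R1 := X.getD r.toNat [] with hR1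
  set R2 := X.getD (r + 1).toNat [] with hR2
  have hx0 : PySem.List.pyGetD X (r - 1) [] = R0 :=
    PySem.List.pyGetD_of_nonneg X [] (by omega)
  have hx1 : PySem.List.pyGetD X r [] = R1 :=
    PySem.List.pyGetD_of_nonneg X [] (by omega)
  have hx2 : PySem.List.pyGetD X (r + 1) [] = R2 :=
    PySem.List.pyGetD_of_nonneg X [] (by omega)
  -- each band row is a member of X, hence has length ≥ N
  have hmem : ∀ (n : Nat), n < X.length → X.getD n [] ∈ X := by
    intro n hn
    rw [List.getD_eq_getElem X [] hn]; exact List.getElem_mem hn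
  have hl0 : N ≤ R0.length := hlen _ (hmem _ (by omega))
  have hl1 : N ≤ R1.length := hlen _ (hmem _ (by omega))
  have hl2 : N ≤ R2.length := hlen _ (hmem _ (by omega))
  have hS : ∀ (j : Nat), j < N →
      (tripleSum R0 R1 R2).getD j 0 = R0.getD j 0 + R1.getD j 0 + R2.getD j 0 := by
    intro j hj
    exact tripleSum_getD R0 R1 R2 j (by omega) (by omega) (by omega)
  rw [hrange, hx0, hx1, hx2]
  simp only [List.foldl]
  rw [show r + -1 = r - 1 from by ring, show r + 0 = r from by ring,
      show c + -1 = c - 1 from by ring, show c + 0 = c from by ring,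
      hx0, hx1, hx2]
  rw [PySem.List.pyGetD_of_nonneg R0 0 (show (0:Int) ≤ c - 1 by omega),
      PySem.List.pyGetD_of_nonneg R0 0 (show (0:Int) ≤ c by omega),
      PySem.List.pyGetD_of_nonneg R0 0 (show (0:Int) ≤ c + 1 by omega),
      PySem.List.pyGetD_of_nonneg R1 0 (show (0:Int) ≤ c - 1 by omega),
      PySem.List.pyGetD_of_nonneg R1 0 (show (0:Int) ≤ c by omega),
      PySem.List.pyGetD_of_nonneg R1 0 (show (0:Int) ≤ c + 1 by omega),
      PySem.List.pyGetD_of_nonneg R2 0 (show (0:Int) ≤ c - 1 by omega),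
      PySem.List.pyGetD_of_nonneg R2 0 (show (0:Int) ≤ c by omega),
      PySem.List.pyGetD_of_nonneg R2 0 (show (0:Int) ≤ c + 1 by omega)]
  show _ = PySem.List.pyGetD (tripleSum R0 R1 R2) (c - 1) 0
      + PySem.List.pyGetD (tripleSum R0 R1 R2) c 0
      + PySem.List.pyGetD (tripleSum R0 R1 R2) (c + 1) 0
  rw [PySem.List.pyGetD_of_nonneg _ 0 (show (0:Int) ≤ c - 1 by omega),
      PySem.List.pyGetD_of_nonneg _ 0 (show (0:Int) ≤ c by omega),
      PySem.List.pyGetD_of_nonneg _ 0 (show (0:Int) ≤ c + 1 by omega),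
      hS (c - 1).toNat (by omega), hS c.toNat (by omega), hS (c + 1).toNat (by omega)]
  ring

theorem computeNbrs_spec : Claim_equal_computeNbrs := by
  intro X _hdom hpre
  obtain ⟨hne, hrect⟩ := hpre
  unfold Spec_computeNbrs computeNbrs computeNbrs_alt
  apply List.map_congr_left
  intro r hr
  rw [PySem.List.mem_pyRange_one] at hr
  apply List.map_congr_left
  intro c hc
  rw [PySem.List.mem_pyRange_one] at hc
  have hhead : PySem.List.pyGetD X 0 [] = X.headD [] := by
    cases X with
    | nil => simp at hne
    | cons x xs => rw [PySem.List.pyGetD_zero_cons]; rfl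
  rw [hhead] at hc
  have hM : 3 ≤ X.length := by omega
  have hN : 3 ≤ (X.headD []).length := by omega
  have hlen := hrect hM hN
  have hkey := cell_eq X (X.headD []).length hlen r c hr.1 hr.2 hc.1 hc.2
  simp only [hkey]
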